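-- pv_equiv track=rewrite | github.com/hansalemaos/group_and_iter_everything | __init__.py | iter_rotate_left
-- ===== SOURCE A (Python) =====
-- def iter_rotate_left(iterable, n, onlyfinal=False):
--     try:
--         iterable_ = iterable.copy()
--     except Exception:
--         iterable_ = iterable
--
--     for _ in range(n):
--         iterable_ = iterable_[1:] + iterable_[:1]
--         if not onlyfinal:
--             yield iterable_
--     if onlyfinal:
--         yield iterable_
-- ===== SOURCE B (Python) =====
-- def iter_rotate_left(iterable, n, onlyfinal=False):
--     L = len(iterable)
--     d = iterable + iterable
--     m = max(n, 0)
--     if onlyfinal: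
--         off = m % L if L else 0
--         yield d[off:off + L]
--     else:
--         for i in range(1, m + 1):
--             off = i % L if L else 0
--             yield d[off:off + L]
-- ===== Notes on version B (the rewrite author's own statement) =====
-- stated objective: alternative
-- what changed: Instead of threading a running rotated value re-sliced each step, B precomputes the doubled sequence once and yields independent windows d[i%L : i%L+L]; each yield is O(L) directly from the table, with no dependence between steps.
import Mathlib
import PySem

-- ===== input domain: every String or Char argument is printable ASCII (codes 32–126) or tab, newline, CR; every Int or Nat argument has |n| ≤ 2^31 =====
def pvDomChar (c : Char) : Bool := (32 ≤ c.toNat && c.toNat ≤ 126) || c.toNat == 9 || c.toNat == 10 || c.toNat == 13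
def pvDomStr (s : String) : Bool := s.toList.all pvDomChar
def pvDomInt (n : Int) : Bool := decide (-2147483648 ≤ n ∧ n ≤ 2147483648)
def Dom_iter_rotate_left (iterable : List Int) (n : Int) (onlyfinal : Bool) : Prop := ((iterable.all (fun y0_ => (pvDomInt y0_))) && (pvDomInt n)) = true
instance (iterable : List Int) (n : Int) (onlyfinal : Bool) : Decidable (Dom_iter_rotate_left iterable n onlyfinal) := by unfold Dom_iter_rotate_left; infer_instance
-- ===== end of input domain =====

-- B replaces A's step-by-step re-slicing of a running rotated value by independent
-- windows into the doubled sequence (alternative decomposition; same total cost).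
-- Both versions are generators in Python; equivalence is about the yielded values in order.

-- ===== PORT A =====
-- the loop body: iterable_ = iterable_[1:] + iterable_[:1], yield collected unless onlyfinal
def stepA (onlyfinal : Bool) (st : List Int × List (List Int)) (_ : Int) : List Int × List (List Int) :=
  let c := PySem.List.slice st.1 (some 1) none ++ PySem.List.slice st.1 none (some 1)
  (c, if onlyfinal then st.2 else st.2 ++ [c])

-- list(iter_rotate_left(iterable, n, onlyfinal)): runs the generator to completion.
def iter_rotate_left (iterable : List Int) (n : Int) (onlyfinal : Bool) : List (List Int) :=
  let st := (PySem.List.pyRange 0 n 1).foldl (stepA onlyfinal) (iterable, [])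
  if onlyfinal then [st.1] else st.2

-- ===== PORT B =====
def iter_rotate_left_alt (iterable : List Int) (n : Int) (onlyfinal : Bool) : List (List Int) :=
  let L : Int := iterable.length
  let d := iterable ++ iterable
  let m := max n 0
  if onlyfinal then
    let off := if L = 0 then 0 else PySem.Int.mod m L
    [PySem.List.slice d (some off) (some (off + L))]
  else
    (PySem.List.pyRange 1 (m + 1) 1).map (fun i =>
      let off := if L = 0 then 0 else PySem.Int.mod i L
      PySem.List.slice d (some off) (some (off + L)))

-- ===== PRECONDITION & SPEC =====
def Spec_iter_rotate_left (iterable : List Int) (n : Int) (onlyfinal : Bool) (out : List (List Int)) : Prop := out = iter_rotate_left_alt iterable n onlyfinal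
instance (iterable : List Int) (n : Int) (onlyfinal : Bool) (out : List (List Int)) : Decidable (Spec_iter_rotate_left iterable n onlyfinal out) := by unfold Spec_iter_rotate_left; infer_instance

-- ===== CLAIM (what is proved, stated in full; the proofs are below) =====
def Claim_equal_iter_rotate_left : Prop := ∀ (iterable : List Int) (n : Int) (onlyfinal : Bool), Dom_iter_rotate_left iterable n onlyfinal → Spec_iter_rotate_left iterable n onlyfinal (iter_rotate_left iterable n onlyfinal)

-- ===== LEMMAS AND PROOFS =====

-- One step of A: l[1:] + l[:1] is a left rotation by one.
lemma rot1_eq (l : List Int) :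
    PySem.List.slice l (some 1) none ++ PySem.List.slice l none (some 1) = l.rotate 1 := by
  rw [PySem.List.slice_from_one, show (1 : Int) = ((1 : Nat) : Int) from rfl,
    PySem.List.slice_to_natCast]
  cases l with
  | nil => simp
  | cons a t => simp [List.rotate_cons_succ]

-- A's loop, characterised: after iterating over idxs the running value is
-- c.rotate idxs.length and the yields are the successive rotations.
lemma loopA (onlyfinal : Bool) : ∀ (idxs : List Int) (c : List Int) (acc : List (List Int)),
    idxs.foldl (stepA onlyfinal) (c, acc)
    = (c.rotate idxs.length,
       acc ++ (if onlyfinal then [] else (List.range idxs.length).map (fun j => c.rotate (j + 1)))) := by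
  intro idxs
  induction idxs with
  | nil => intro c acc; simp
  | cons x xs ih =>
    intro c acc
    have hstep : stepA onlyfinal (c, acc) x
        = (c.rotate 1, if onlyfinal then acc else acc ++ [c.rotate 1]) := by
      simp [stepA, rot1_eq]
    rw [List.foldl_cons, hstep, ih]
    refine Prod.ext ?_ ?_
    · simp only [List.rotate_rotate, List.length_cons]
      congr 1
      omega
    · cases onlyfinal with
      | true => simp
      | false =>
        simp [List.range_succ_eq_map, List.map_map, Function.comp, List.rotate_rotate]
        intro a _
        congr 1
        omega

-- B's window: the slice d[k : k+L] of the doubled list is the rotation by k.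
lemma window_eq (l : List Int) (k : Nat) (hk : k ≤ l.length) :
    PySem.List.slice (l ++ l) (some (k : Int)) (some ((k : Int) + (l.length : Int))) = l.rotate k := by
  rw [PySem.List.slice_natCast_add, List.drop_append_of_le_length hk, List.take_append,
    List.rotate_eq_drop_append_take hk]
  congr 1
  · exact List.take_of_length_le (by simp)
  · congr 1
    simp
    omega

-- ===== VERDICT (by name: the statement is the Claim_ definition above) =====
theorem iter_rotate_left_spec : Claim_equal_iter_rotate_left := by
  intro iterable n onlyfinal _
  unfold Spec_iter_rotate_left iter_rotate_left iter_rotate_left_alt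
  have hlen : (PySem.List.pyRange 0 n 1).length = n.toNat := by
    rw [PySem.List.length_pyRange_one]; omega
  have hmax : max n 0 = ((n.toNat : Nat) : Int) := by omega
  have key : ∀ (l : List Int) (k : Nat), l ≠ [] →
      PySem.List.slice (l ++ l)
        (some (if (l.length : Int) = 0 then 0 else PySem.Int.mod ((k : Nat) : Int) (l.length : Int)))
        (some ((if (l.length : Int) = 0 then 0 else PySem.Int.mod ((k : Nat) : Int) (l.length : Int)) + (l.length : Int)))
      = l.rotate k := by
    intro l k hne
    have hpos : 0 < l.length := List.length_pos_iff.mpr hne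
    rw [if_neg (by omega)]
    rw [show PySem.Int.mod ((k : Nat) : Int) ((l.length : Nat) : Int)
          = ((k % l.length : Nat) : Int) from PySem.Int.mod_natCast _ _]
    rw [window_eq l (k % l.length) (le_of_lt (Nat.mod_lt _ hpos))]
    rw [List.rotate_mod]
  cases onlyfinal with
  | true =>
    simp only [loopA, hlen, if_true]
    rcases eq_or_ne iterable [] with h | h
    · subst h; simp [PySem.List.slice]
    · rw [hmax, key iterable n.toNat h]
  | false =>
    simp only [loopA, hlen, Bool.false_eq_true, reduceIte, List.nil_append]
    rw [hmax, show ((n.toNat : Nat) : Int) + 1 = (((n.toNat + 1 : Nat)) : Int) by push_cast; ring,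
      PySem.List.pyRange_one]
    have h1 : ((n.toNat + 1 : Nat) : Int) - 1 = ((n.toNat : Nat) : Int) := by push_cast; ring
    rw [h1, Int.toNat_natCast, List.map_map]
    apply List.map_congr_left
    intro k _
    simp only [Function.comp]
    rcases eq_or_ne iterable [] with h | h
    · subst h; simp [PySem.List.slice]
    · rw [show (1 : Int) + (k : Int) = (((k + 1 : Nat)) : Int) by push_cast; ring,
        key iterable (k + 1) h]
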